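-- pv_equiv track=rewrite | github.com/JoeHartleyBath/adaptive_matb_2026 | src/python/verify_pilot_scenarios.py | _ordered_base_offsets
-- ===== SOURCE A (Python) =====
-- def _expected_offsets(count: int) -> list[int]:
--     return [15 + ((i + 1) * 275) // (count + 1) for i in range(count)]
--
-- def _ordered_base_offsets(counts: dict[str, int]) -> list[tuple[str, int, int]]:
--     base: list[tuple[str, int, int]] = []
--     for task in ("sysmon", "communications", "resman"):
--         offsets = _expected_offsets(counts[task])
--         for idx, offset in enumerate(offsets):
--             base.append((task, offset, idx))
--     priority = {"sysmon": 0, "communications": 1, "resman": 2}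
--     base.sort(key=lambda x: (x[1], priority[x[0]], x[2]))
--     return base
-- ===== SOURCE B (Python) =====
-- def _expected_offsets(count: int) -> list[int]:
--     return [15 + ((i + 1) * 275) // (count + 1) for i in range(count)]
--
-- def _merge2(xs, ys):
--     # merge two lists already sorted by offset; on equal offsets take from xs
--     out = []
--     i = j = 0
--     while i < len(xs) and j < len(ys):
--         if xs[i][1] <= ys[j][1]:
--             out.append(xs[i])
--             i += 1
--         else:
--             out.append(ys[j])
--             j += 1
--     out.extend(xs[i:])
--     out.extend(ys[j:])
--     return out
--
-- def _ordered_base_offsets(counts: dict[str, int]) -> list[tuple[str, int, int]]: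
--     # Each per-task run is already sorted by the full key (offset, priority, idx):
--     # offsets are nondecreasing in idx and priority is constant per task. Merging
--     # the runs in priority order (ties to the left) yields the sorted result.
--     runs = [
--         [(task, offset, idx) for idx, offset in enumerate(_expected_offsets(counts[task]))]
--         for task in ("sysmon", "communications", "resman")
--     ]
--     return _merge2(_merge2(runs[0], runs[1]), runs[2])
-- ===== Notes on version B (the rewrite author's own statement) =====
-- stated objective: alternative
-- what changed: Replaces concatenate-then-comparison-sort with an explicit merge of the three per-task runs, which are already sorted by the full key (offsets nondecreasing per task, priority constant, idx increasing), taking ties from the lower-priority run.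
import Mathlib
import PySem

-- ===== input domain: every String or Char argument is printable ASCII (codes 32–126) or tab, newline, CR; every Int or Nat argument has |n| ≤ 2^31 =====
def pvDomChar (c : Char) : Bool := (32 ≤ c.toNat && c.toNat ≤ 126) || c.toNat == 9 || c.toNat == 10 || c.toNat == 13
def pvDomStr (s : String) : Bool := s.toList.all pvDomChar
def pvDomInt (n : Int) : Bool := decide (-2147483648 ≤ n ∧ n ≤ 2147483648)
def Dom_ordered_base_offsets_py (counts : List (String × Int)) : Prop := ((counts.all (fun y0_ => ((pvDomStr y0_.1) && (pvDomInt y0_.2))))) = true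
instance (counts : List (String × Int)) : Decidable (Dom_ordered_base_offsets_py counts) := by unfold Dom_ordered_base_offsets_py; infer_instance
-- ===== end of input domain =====

-- B replaces A's concatenate-then-sort with an explicit merge of the three per-task runs,
-- which are already sorted by A's full sort key; same output, a different (merge) algorithm.

-- ===== PORT A =====
def expected_offsets_py (count : Int) : List Int :=
  (PySem.List.pyRange 0 count 1).map (fun i => 15 + PySem.Int.floordiv ((i + 1) * 275) (count + 1))

def priority_py : PySem.Dict String Int :=
  PySem.Dict.ofList [("sysmon", 0), ("communications", 1), ("resman", 2)]

-- the sort key lambda: (x[1], priority[x[0]], x[2]); every x[0] occurring in base is a key of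
-- priority_py, so getD's default 0 is never consulted
def pvKey (x : String × Int × Int) : Int ×ₗ Int ×ₗ Int :=
  toLex (x.2.1, toLex (priority_py.getD x.1 0, x.2.2))

def ordered_base_offsets_py (counts : List (String × Int)) : List (String × Int × Int) :=
  let base := ["sysmon", "communications", "resman"].foldl (fun acc task =>
    -- counts[task]: first-match lookup; Pre_ excludes the KeyError (none) case, so getD's default is unused
    let offsets := expected_offsets_py ((counts.lookup task).getD 0)
    acc ++ (PySem.List.enumerate offsets).map (fun p => (task, p.2, p.1))) []
  PySem.List.sorted base pvKey false

-- ===== PORT B =====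
def expected_offsets_alt (count : Int) : List Int :=
  (PySem.List.pyRange 0 count 1).map (fun i => 15 + PySem.Int.floordiv ((i + 1) * 275) (count + 1))

-- Source B's _merge2 while-loop over indices i, j, transcribed as the structural recursion
-- over the two list suffixes; same comparison, same emission order
def merge2_alt : List (String × Int × Int) → List (String × Int × Int) → List (String × Int × Int)
  | [], ys => ys
  | x :: xs, [] => x :: xs
  | x :: xs, y :: ys =>
    if x.2.1 ≤ y.2.1 then x :: merge2_alt xs (y :: ys)
    else y :: merge2_alt (x :: xs) ys

-- one per-task run: [(task, offset, idx) for idx, offset in enumerate(_expected_offsets(counts[task]))]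
def run_alt (counts : List (String × Int)) (task : String) : List (String × Int × Int) :=
  (PySem.List.enumerate (expected_offsets_alt ((counts.lookup task).getD 0))).map
    (fun p => (task, p.2, p.1))

def ordered_base_offsets_py_alt (counts : List (String × Int)) : List (String × Int × Int) :=
  merge2_alt (merge2_alt (run_alt counts "sysmon") (run_alt counts "communications"))
    (run_alt counts "resman")

-- ===== PRECONDITION & SPEC =====
-- Pre_ excludes exactly the inputs where Python A raises KeyError: one of the three task keys missing
def Pre_ordered_base_offsets_py (counts : List (String × Int)) : Prop :=
  (counts.lookup "sysmon").isSome ∧ (counts.lookup "communications").isSome ∧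
    (counts.lookup "resman").isSome
instance (counts : List (String × Int)) : Decidable (Pre_ordered_base_offsets_py counts) := by
  unfold Pre_ordered_base_offsets_py; infer_instance

def pvWitness_ordered_base_offsets_py : (List (String × Int)) :=
  [("sysmon", 2), ("communications", 1), ("resman", 3)]

def Spec_ordered_base_offsets_py (counts : List (String × Int)) (out : List (String × Int × Int)) : Prop := out = ordered_base_offsets_py_alt counts
instance (counts : List (String × Int)) (out : List (String × Int × Int)) : Decidable (Spec_ordered_base_offsets_py counts out) := by unfold Spec_ordered_base_offsets_py; infer_instance

-- ===== CLAIM (what is proved, stated in full; the proofs are below) =====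
def Claim_equal_ordered_base_offsets_py : Prop := ∀ (counts : List (String × Int)), Dom_ordered_base_offsets_py counts → Pre_ordered_base_offsets_py counts → Spec_ordered_base_offsets_py counts (ordered_base_offsets_py counts)

-- ===== LEMMAS AND PROOFS =====


-- merge2 is a permutation of the concatenation
theorem merge2_perm (xs ys : List (String × Int × Int)) : (merge2_alt xs ys).Perm (xs ++ ys) := by
  fun_induction merge2_alt xs ys with
  | case1 ys => simp
  | case2 x xs => simp
  | case3 x xs y ys h ih => exact ih.cons x
  | case4 x xs y ys h ih =>
    exact ((ih.cons y).trans (List.perm_middle.symm)).trans (by simp)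

theorem mem_merge2 {z : String × Int × Int} {xs ys : List (String × Int × Int)}
    (h : z ∈ merge2_alt xs ys) : z ∈ xs ∨ z ∈ ys := by
  have := (merge2_perm xs ys).mem_iff.mp h
  simpa using this

-- pvKey strictly respects the offset order, and refines it
theorem pvKey_lt_of_offset_lt {a b : String × Int × Int} (h : a.2.1 < b.2.1) :
    pvKey a < pvKey b := by
  unfold pvKey
  exact Prod.Lex.toLex_lt_toLex.mpr (Or.inl h)

theorem offset_le_of_pvKey_lt {a b : String × Int × Int} (h : pvKey a < pvKey b) :
    a.2.1 ≤ b.2.1 := by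
  rcases Prod.Lex.toLex_lt_toLex.mp h with h' | ⟨h', _⟩
  · exact le_of_lt h'
  · exact le_of_eq h'

-- equal offsets, smaller priority: the key is smaller
theorem pvKey_lt_of_prio_lt {a b : String × Int × Int} (ho : a.2.1 = b.2.1)
    (hp : priority_py.getD a.1 0 < priority_py.getD b.1 0) : pvKey a < pvKey b := by
  unfold pvKey
  exact Prod.Lex.toLex_lt_toLex.mpr (Or.inr ⟨ho, Prod.Lex.toLex_lt_toLex.mpr (Or.inl hp)⟩)

-- the merge of two key-sorted lists is key-sorted, provided offset-ties resolve left-before-right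
theorem merge2_pairwise (xs ys : List (String × Int × Int))
    (hx : xs.Pairwise (fun a b => pvKey a < pvKey b))
    (hy : ys.Pairwise (fun a b => pvKey a < pvKey b))
    (hcross : ∀ a ∈ xs, ∀ b ∈ ys, a.2.1 = b.2.1 → pvKey a < pvKey b) :
    (merge2_alt xs ys).Pairwise (fun a b => pvKey a < pvKey b) := by
  fun_induction merge2_alt xs ys with
  | case1 ys => exact hy
  | case2 x xs => exact hx
  | case3 x xs y ys h ih =>
    rw [List.pairwise_cons] at hx
    refine List.pairwise_cons.mpr ⟨?_, ih hx.2 hy (fun a ha b hb => hcross a (by simp [ha]) b hb)⟩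
    intro z hz
    rcases mem_merge2 hz with hz | hz
    · exact hx.1 z hz
    · have hyz : y.2.1 ≤ z.2.1 := by
        rcases List.mem_cons.mp hz with rfl | hz'
        · exact le_refl _
        · exact offset_le_of_pvKey_lt ((List.pairwise_cons.mp hy).1 z hz')
      rcases lt_or_eq_of_le (le_trans h hyz) with hlt | heq
      · exact pvKey_lt_of_offset_lt hlt
      · exact hcross x (by simp) z hz heq
  | case4 x xs y ys h ih =>
    rw [not_le] at h
    rw [List.pairwise_cons] at hy
    refine List.pairwise_cons.mpr ⟨?_, ih hx hy.2 (fun a ha b hb => hcross a ha b (by simp [hb]))⟩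
    intro z hz
    rcases mem_merge2 hz with hz | hz
    · have hxz : x.2.1 ≤ z.2.1 := by
        rcases List.mem_cons.mp hz with rfl | hz'
        · exact le_refl _
        · exact offset_le_of_pvKey_lt ((List.pairwise_cons.mp hx).1 z hz')
      exact pvKey_lt_of_offset_lt (lt_of_lt_of_le h hxz)
    · exact hy.1 z hz

-- offsets are nondecreasing along a run
theorem offsets_mono (c : Int) (i j : Nat) (hij : i ≤ j)
    (hi : i < (expected_offsets_alt c).length) (hj : j < (expected_offsets_alt c).length) :
    (expected_offsets_alt c)[i] ≤ (expected_offsets_alt c)[j] := by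
  have hc : 0 < c := by
    by_contra hc
    rw [not_lt] at hc
    have hnil : expected_offsets_alt c = [] := by
      unfold expected_offsets_alt
      rw [PySem.List.pyRange_one_eq_nil (by omega : c ≤ 0)]
      rfl
    rw [hnil] at hi
    simp at hi
  unfold expected_offsets_alt
  simp only [List.getElem_map, PySem.List.getElem_pyRange_one]
  have h2 : (0:Int) < c + 1 := by omega
  rw [PySem.Int.floordiv_eq_ediv_of_pos h2, PySem.Int.floordiv_eq_ediv_of_pos h2]
  have hnum : ((0:Int) + i + 1) * 275 ≤ ((0:Int) + j + 1) * 275 := by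
    have : (i:Int) ≤ (j:Int) := by exact_mod_cast hij
    nlinarith
  have := Int.ediv_le_ediv h2 hnum
  omega

-- each run is sorted by pvKey
theorem run_pairwise (counts : List (String × Int)) (t : String) :
    (run_alt counts t).Pairwise (fun a b => pvKey a < pvKey b) := by
  unfold run_alt
  rw [List.pairwise_map, List.pairwise_iff_getElem]
  intro i j hi hj hij
  rw [PySem.List.length_enumerate] at hi hj
  rw [PySem.List.getElem_enumerate _ _ _ (by rwa [PySem.List.length_enumerate]),
    PySem.List.getElem_enumerate _ _ _ (by rwa [PySem.List.length_enumerate])]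
  have hoff := offsets_mono _ i j (le_of_lt hij) hi hj
  rcases lt_or_eq_of_le hoff with hlt | heq
  · exact pvKey_lt_of_offset_lt hlt
  · unfold pvKey
    refine Prod.Lex.toLex_lt_toLex.mpr (Or.inr ⟨heq, ?_⟩)
    refine Prod.Lex.toLex_lt_toLex.mpr (Or.inr ⟨rfl, ?_⟩)
    simpa using (by exact_mod_cast hij : (i:Int) < (j:Int))

theorem run_fst {counts : List (String × Int)} {t : String} {a : String × Int × Int}
    (h : a ∈ run_alt counts t) : a.1 = t := by
  unfold run_alt at h
  rcases List.mem_map.mp h with ⟨p, _, rfl⟩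
  rfl

-- cross-run tie-break: equal offsets across two runs of strictly increasing priority
theorem cross_runs {counts : List (String × Int)} {t u : String}
    (hp : priority_py.getD t 0 < priority_py.getD u 0) :
    ∀ a ∈ run_alt counts t, ∀ b ∈ run_alt counts u, a.2.1 = b.2.1 → pvKey a < pvKey b := by
  intro a ha b hb ho
  exact pvKey_lt_of_prio_lt ho (by rw [run_fst ha, run_fst hb]; exact hp)

-- ===== VERDICT (by name: the statement is the Claim_ definition above) =====
theorem ordered_base_offsets_py_spec : Claim_equal_ordered_base_offsets_py := by
  intro counts _ _
  unfold Spec_ordered_base_offsets_py ordered_base_offsets_py ordered_base_offsets_py_alt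
  simp only [List.foldl_cons, List.foldl_nil, List.nil_append]
  show PySem.List.sorted
      ((run_alt counts "sysmon" ++ run_alt counts "communications") ++ run_alt counts "resman")
      pvKey false
    = merge2_alt (merge2_alt (run_alt counts "sysmon") (run_alt counts "communications"))
        (run_alt counts "resman")
  have h01 := merge2_pairwise (run_alt counts "sysmon") (run_alt counts "communications")
    (run_pairwise counts "sysmon") (run_pairwise counts "communications")
    (cross_runs (by decide))
  apply PySem.List.sorted_eq_of_perm_of_pairwise_lt
  · exact (merge2_perm _ _).trans ((merge2_perm _ _).append_right _)
  · refine merge2_pairwise _ _ h01 (run_pairwise counts "resman") ?_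
    intro a ha b hb ho
    rcases mem_merge2 ha with ha | ha
    · exact cross_runs (by decide) a ha b hb ho
    · exact cross_runs (by decide) a ha b hb ho
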